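-- pv_equiv track=rewrite | github.com/Twoeyes22/personal | 240827/ant.py | solution
-- ===== SOURCE A (Python) =====
-- def solution(hp):
--     answer=0
--     ant=[5,3,1]
--     for i in ant:
--         answer+=hp//i
--         hp-=(hp//i)*i
--         if hp==0 :
--             return answer
-- ===== SOURCE B (Python) =====
-- # Table-driven: one division by 5; the minimal extra attacks for each residue 0..4
-- # are precomputed (residue r needs (0,1,2,1,2)[r] more attacks with hp 3 and 1).
-- _EXTRA = (0, 1, 2, 1, 2)
--
-- def solution(hp):
--     return hp // 5 + _EXTRA[hp % 5]
-- ===== Notes on version B (the rewrite author's own statement) =====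
-- stated objective: simpler
-- what changed: Replaced the greedy loop over the three attack denominations by a single division by the largest denomination plus a precomputed five-entry lookup table of the extra attacks for each residue, removing the per-denomination greedy passes entirely.
import Mathlib
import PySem

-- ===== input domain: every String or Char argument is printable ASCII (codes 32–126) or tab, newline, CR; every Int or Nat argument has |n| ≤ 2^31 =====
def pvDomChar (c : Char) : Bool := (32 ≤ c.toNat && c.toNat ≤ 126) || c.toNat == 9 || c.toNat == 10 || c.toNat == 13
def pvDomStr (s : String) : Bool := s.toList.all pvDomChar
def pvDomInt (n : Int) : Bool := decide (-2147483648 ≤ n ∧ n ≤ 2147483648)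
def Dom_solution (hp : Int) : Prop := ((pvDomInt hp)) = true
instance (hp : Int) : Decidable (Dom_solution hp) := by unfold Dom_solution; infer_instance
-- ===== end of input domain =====

-- B replaces A's greedy loop over 5,3,1 by one division by 5 plus a precomputed
-- residue lookup table (simpler: no loop, no greedy passes).

-- ===== PORT A =====
-- for i in ant: answer += hp//i; hp -= (hp//i)*i; if hp==0: return answer
-- The [] case is unreachable in Python (after i=1, hp is always 0); Python would return None there.
def solutionGo : List Int → Int → Int → Int
  | [], answer, _ => answer
  | i :: rest, answer, hp =>
      let answer' := answer + PySem.Int.floordiv hp i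
      let hp' := hp - (PySem.Int.floordiv hp i) * i
      if hp' = 0 then answer' else solutionGo rest answer' hp'

def solution (hp : Int) : Int := solutionGo [5, 3, 1] 0 hp

-- ===== PORT B =====
-- _EXTRA = (0, 1, 2, 1, 2); hp // 5 + _EXTRA[hp % 5]
-- hp % 5 is always in range 0..4 (Python % with positive divisor), so the
-- tuple index never raises; getD 0 is the in-range lookup.
def solutionExtra : List Int := [0, 1, 2, 1, 2]

def solution_alt (hp : Int) : Int :=
  PySem.Int.floordiv hp 5 + (PySem.List.pyGet? solutionExtra (PySem.Int.mod hp 5)).getD 0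

-- ===== PRECONDITION & SPEC =====
def Spec_solution (hp : Int) (out : Int) : Prop := out = solution_alt hp
instance (hp : Int) (out : Int) : Decidable (Spec_solution hp out) := by unfold Spec_solution; infer_instance

-- ===== CLAIM (what is proved, stated in full; the proofs are below) =====
def Claim_equal_solution : Prop := ∀ (hp : Int), Dom_solution hp → Spec_solution hp (solution hp)

-- ===== LEMMAS AND PROOFS =====
theorem sub_fdiv_mul_eq_fmod (a b : Int) : a - a.fdiv b * b = a.fmod b := by
  have h := PySem.Int.floordiv_mul_add_mod a b
  simp only [PySem.Int.floordiv, PySem.Int.mod] at h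
  omega

-- A's loop computes hp.fdiv 5 + r.fdiv 3 + r.fmod 3 where r = hp.fmod 5
theorem solutionGo_closed (hp : Int) :
    solutionGo [5, 3, 1] 0 hp
      = hp.fdiv 5 + (hp.fmod 5).fdiv 3 + (hp.fmod 5).fmod 3 := by
  simp only [solutionGo, PySem.Int.floordiv, zero_add]
  simp only [sub_fdiv_mul_eq_fmod, Int.fdiv_one]
  split_ifs with h5 h3
  · simp [h5]
  · simp [h3]
  · ring
  · ring

theorem solution_eq_alt (hp : Int) : solution hp = solution_alt hp := by
  have hr : 0 ≤ hp.fmod 5 ∧ hp.fmod 5 < 5 := by rw [Int.fmod_eq_emod]; omega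
  obtain ⟨hr0, hr5⟩ := hr
  unfold solution solution_alt
  rw [solutionGo_closed]
  simp only [PySem.Int.floordiv, PySem.Int.mod]
  set r := hp.fmod 5 with hrdef
  interval_cases r <;> simp [PySem.List.pyGet?, PySem.List.pyIdx?, solutionExtra] <;> ring

-- ===== VERDICT (by name: the statement is the Claim_ definition above) =====
theorem solution_spec : Claim_equal_solution := by
  intro hp _
  exact solution_eq_alt hp
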